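-- pv_equiv track=rewrite | github.com/nch-igm/PatternsInTheSilence | scripts/codon_context_plotting_variables.py | get_flat_sequence_labels_formatted
-- ===== SOURCE A (Python) =====
-- def get_flat_sequence_labels_formatted (seq_length, cp3_index) :
--     left_length = (cp3_index-3)+1
--     right_length = seq_length-(cp3_index+1)
--
--     left_labels = [f"$N_{{-{x}}}$" for x in range(1,left_length+1)[::-1]]
--     codon_labels = ["CP1", "CP2", "CP3"]
--     rght_labels = [f"$N_{{+{x}}}$" for x in range(1,right_length+1)]
--
--     labels = left_labels + codon_labels + rght_labels
--
--     return labels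
-- ===== SOURCE B (Python) =====
-- def get_flat_sequence_labels_formatted(seq_length, cp3_index):
--     left = max(cp3_index - 2, 0)
--     right = max(seq_length - cp3_index - 1, 0)
--     return [
--         f"$N_{{-{left - i}}}$" if i < left
--         else (f"CP{i - left + 1}" if i < left + 3
--               else f"$N_{{+{i - left - 2}}}$")
--         for i in range(left + 3 + right)
--     ]
-- ===== Notes on version B (the rewrite author's own statement) =====
-- stated objective: alternative
-- what changed: Replaces A's three segmented comprehensions (a reversed left range, a constant codon list, a right range, then concatenation) with a single positional pass over range(left+3+right) that picks each label by branching on the index.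
import Mathlib
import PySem

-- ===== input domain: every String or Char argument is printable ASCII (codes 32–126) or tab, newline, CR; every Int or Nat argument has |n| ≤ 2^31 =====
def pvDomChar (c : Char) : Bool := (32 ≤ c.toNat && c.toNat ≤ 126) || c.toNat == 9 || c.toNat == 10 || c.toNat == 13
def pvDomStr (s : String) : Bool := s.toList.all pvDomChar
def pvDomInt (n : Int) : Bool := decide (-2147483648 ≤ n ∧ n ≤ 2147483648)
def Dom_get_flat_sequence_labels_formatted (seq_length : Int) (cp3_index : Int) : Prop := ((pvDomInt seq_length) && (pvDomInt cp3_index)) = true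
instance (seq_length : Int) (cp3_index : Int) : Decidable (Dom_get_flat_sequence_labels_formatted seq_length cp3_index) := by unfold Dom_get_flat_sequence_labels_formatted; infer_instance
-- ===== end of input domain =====

-- B replaces A's three segmented comprehensions (reversed left range + constant codon list + right range)
-- with a single positional pass over range(left+3+right) that branches on the index (objective: alternative decomposition).


-- ===== PORT A =====
def get_flat_sequence_labels_formatted (seq_length : Int) (cp3_index : Int) : List String :=
  let left_length := (cp3_index - 3) + 1
  let right_length := seq_length - (cp3_index + 1)
  let left_labels :=
    ((PySem.List.slice? (PySem.List.pyRange 1 (left_length + 1) 1) none none (-1)).getD []).map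
      (fun x => "$N_{-" ++ PySem.Int.toStr x ++ "}$")
  let codon_labels := ["CP1", "CP2", "CP3"]
  let rght_labels :=
    (PySem.List.pyRange 1 (right_length + 1) 1).map
      (fun x => "$N_{+" ++ PySem.Int.toStr x ++ "}$")
  left_labels ++ codon_labels ++ rght_labels

-- ===== PORT B =====
def get_flat_sequence_labels_formatted_alt (seq_length : Int) (cp3_index : Int) : List String :=
  let left := max (cp3_index - 2) 0
  let right := max (seq_length - cp3_index - 1) 0
  (PySem.List.pyRange 0 (left + 3 + right) 1).map (fun i =>
    if i < left then "$N_{-" ++ PySem.Int.toStr (left - i) ++ "}$"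
    else if i < left + 3 then "CP" ++ PySem.Int.toStr (i - left + 1)
    else "$N_{+" ++ PySem.Int.toStr (i - left - 2) ++ "}$")

-- ===== PRECONDITION & SPEC =====
def Spec_get_flat_sequence_labels_formatted (seq_length : Int) (cp3_index : Int) (out : List String) : Prop := out = get_flat_sequence_labels_formatted_alt seq_length cp3_index
instance (seq_length : Int) (cp3_index : Int) (out : List String) : Decidable (Spec_get_flat_sequence_labels_formatted seq_length cp3_index out) := by unfold Spec_get_flat_sequence_labels_formatted; infer_instance

-- ===== CLAIM (what is proved, stated in full; the proofs are below) =====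
def Claim_equal_get_flat_sequence_labels_formatted : Prop := ∀ (seq_length : Int) (cp3_index : Int), Dom_get_flat_sequence_labels_formatted seq_length cp3_index → Spec_get_flat_sequence_labels_formatted seq_length cp3_index (get_flat_sequence_labels_formatted seq_length cp3_index)

-- ===== LEMMAS AND PROOFS =====

theorem pv_main (seq_length cp3_index : Int) :
    get_flat_sequence_labels_formatted seq_length cp3_index
      = get_flat_sequence_labels_formatted_alt seq_length cp3_index := by
  unfold get_flat_sequence_labels_formatted get_flat_sequence_labels_formatted_alt
  simp only
  set L := cp3_index - 2 with hL
  set R := seq_length - cp3_index - 1 with hR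
  have h1 : cp3_index - 3 + 1 = L := by omega
  have h2 : seq_length - (cp3_index + 1) = R := by omega
  rw [h1, h2, PySem.List.slice?_none_none_neg_one, Option.getD_some]
  have hLs : PySem.List.pyRange 1 (L + 1) 1 = PySem.List.pyRange 1 (max L 0 + 1) 1 := by
    by_cases h : 0 ≤ L
    · rw [max_eq_left h]
    · rw [max_eq_right (by omega : L ≤ 0), PySem.List.pyRange_one_eq_nil (by omega),
        PySem.List.pyRange_one_eq_nil (by omega)]
  have hRs : PySem.List.pyRange 1 (R + 1) 1 = PySem.List.pyRange 1 (max R 0 + 1) 1 := by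
    by_cases h : 0 ≤ R
    · rw [max_eq_left h]
    · rw [max_eq_right (by omega : R ≤ 0), PySem.List.pyRange_one_eq_nil (by omega),
        PySem.List.pyRange_one_eq_nil (by omega)]
  rw [hLs, hRs]
  set l := max L 0 with hl
  set r := max R 0 with hr
  have hl0 : 0 ≤ l := le_max_right _ _
  have hr0 : 0 ≤ r := le_max_right _ _
  clear_value l r
  clear hLs hRs hl hr h1 h2 hL hR
  have hrev := PySem.List.pyRange_neg_one_eq_reverse l 0
  norm_num at hrev
  rw [PySem.List.pyRange_one_append 0 l (l + 3 + r) (by omega) (by omega),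
      PySem.List.pyRange_one_append l (l + 3) (l + 3 + r) (by omega) (by omega),
      List.map_append, List.map_append, List.append_assoc]
  congr 1
  · -- left segment
    rw [← hrev, PySem.List.pyRange_neg_one l 0, PySem.List.pyRange_one 0 l]
    simp only [List.map_map, Int.sub_zero]
    apply List.map_congr_left
    intro k hk
    simp only [List.mem_range] at hk
    simp only [Function.comp]
    rw [if_pos (by omega : ((0:Int) + (k:Int)) < l)]
    have e : l - ((0:Int) + (k:Int)) = l - (k:Int) := by omega
    rw [e]
  congr 1
  · -- codon segment
    rw [PySem.List.pyRange_one l (l + 3)]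
    have h3 : (l + 3 - l).toNat = 3 := by omega
    rw [h3]
    simp only [List.range_succ, List.range_zero, List.nil_append, List.map_cons, List.map_nil,
      List.cons_append]
    rw [if_neg (by push_cast; omega), if_pos (by push_cast; omega),
        if_neg (by push_cast; omega), if_pos (by push_cast; omega),
        if_neg (by push_cast; omega), if_pos (by push_cast; omega)]
    have e1 : l + ((0:Nat):Int) - l + 1 = 1 := by push_cast; omega
    have e2 : l + ((1:Nat):Int) - l + 1 = 2 := by push_cast; omega
    have e3 : l + ((2:Nat):Int) - l + 1 = 3 := by push_cast; omega
    rw [e1, e2, e3]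
    decide
  · -- right segment
    rw [PySem.List.pyRange_one (l + 3) (l + 3 + r), PySem.List.pyRange_one 1 (r + 1)]
    have h4 : (l + 3 + r - (l + 3)).toNat = r.toNat := by omega
    have h5 : (r + 1 - 1).toNat = r.toNat := by omega
    rw [h4, h5]
    simp only [List.map_map]
    apply List.map_congr_left
    intro k hk
    simp only [List.mem_range] at hk
    simp only [Function.comp]
    rw [if_neg (by omega), if_neg (by omega)]
    have e : l + 3 + (k:Int) - l - 2 = 1 + (k:Int) := by omega
    rw [e]


-- ===== VERDICT (by name: the statement is the Claim_ definition above) =====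
theorem get_flat_sequence_labels_formatted_spec : Claim_equal_get_flat_sequence_labels_formatted := by
  intro s c _
  exact pv_main s c
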